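-- pv_equiv track=rewrite | github.com/ZigaStrgar/programiranje1 | P8/naloga/naloga_8.py | ciklicno
-- ===== SOURCE A (Python) =====
-- def visina(plosca):
--     return len(plosca)
--
-- def sirina(plosca):
--     return len(plosca[0])
--
-- def polj(plosca):
--     return visina(plosca) * sirina(plosca)
--
-- def na_plosci(plosca, x, y):
--     return sirina(plosca) > x > -1 and visina(plosca) > y > -1
--
-- def preberi(plosca, x, y):
--     return plosca[y][x][:1], int(plosca[y][x][1:])
--
-- def north(x, y, vrednost):
--     return x, y - vrednost
--
-- def south(x, y, vrednost):
--     return x, y + vrednost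
--
-- def east(x, y, vrednost):
--     return x + vrednost, y
--
-- def west(x, y, vrednost):
--     return x - vrednost, y
--
-- def premakni(plosca, x, y):
--     smer, vrednost = preberi(plosca, x, y)
--     options = {'S': north, 'J': south, 'V': east, 'Z': west}
--     return options[smer](x, y, vrednost)
--
-- def ciklicno(plosca, x, y):
--     prepotovano = []
--     while na_plosci(plosca, x, y):
--         x, y = premakni(plosca, x, y)
--         prepotovano.append((x, y))
--         if len(prepotovano) >= polj(plosca):
--             return True
--     return False
-- ===== SOURCE B (Python) =====
-- def ciklicno(plosca, x, y):
--     visited = set()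
--     while 0 <= x < len(plosca[0]) and 0 <= y < len(plosca):
--         if (x, y) in visited:
--             return True
--         visited.add((x, y))
--         cell = plosca[y][x]
--         smer, vrednost = cell[0], int(cell[1:])
--         if smer == 'S':
--             y -= vrednost
--         elif smer == 'J':
--             y += vrednost
--         elif smer == 'V':
--             x += vrednost
--         else:
--             x -= vrednost
--     return False
-- ===== Notes on version B (the rewrite author's own statement) =====
-- stated objective: idiomatic
-- what changed: True cycle detection with a visited set and a membership test before each move, instead of A's list of moves whose length is compared against the cell count polj.
-- intended difference: On boards where the walk visits polj pairwise-distinct on-board cells and then steps off the board, A returns True (its move counter reaches polj) although the walk escapes; B returns False, the intended answer since such a walk is not cyclic. — e.g. on ciklicno([["V1"]], 0, 0): A returns true, B returns false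
-- outside the precondition, e.g. on ciklicno([['Z1', 'xx']], 0, 0): A returns False, B returns False
import Mathlib
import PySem

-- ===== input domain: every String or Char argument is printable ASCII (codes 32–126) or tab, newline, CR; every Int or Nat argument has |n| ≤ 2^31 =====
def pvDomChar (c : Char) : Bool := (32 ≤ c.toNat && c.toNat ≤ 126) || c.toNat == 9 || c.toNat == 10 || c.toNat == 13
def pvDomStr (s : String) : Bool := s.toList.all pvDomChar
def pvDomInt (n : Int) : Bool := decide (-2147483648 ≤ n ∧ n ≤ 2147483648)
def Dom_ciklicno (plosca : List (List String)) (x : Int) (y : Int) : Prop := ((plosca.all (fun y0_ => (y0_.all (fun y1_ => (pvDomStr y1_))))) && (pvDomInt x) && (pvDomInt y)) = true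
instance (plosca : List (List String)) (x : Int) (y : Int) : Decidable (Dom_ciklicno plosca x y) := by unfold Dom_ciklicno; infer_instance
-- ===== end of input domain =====

-- B replaces A's move-counting list (length compared with polj) by a visited set with a
-- membership test before each move: true cycle detection, same walk (idiomatic; not faster).

-- ===== PORT A =====
def visinaA (plosca : List (List String)) : Int := plosca.length

-- len(plosca[0]): IndexError on an empty board, excluded by Pre_
def sirinaA (plosca : List (List String)) : Int := (plosca.headD []).length

def poljA (plosca : List (List String)) : Int := visinaA plosca * sirinaA plosca

def naPlosciA (plosca : List (List String)) (x y : Int) : Bool :=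
  decide (sirinaA plosca > x ∧ x > -1) && decide (visinaA plosca > y ∧ y > -1)

-- plosca[y][x][:1], int(plosca[y][x][1:]); the getD defaults stand for IndexError/ValueError,
-- all excluded by Pre_ (under the loop guard the indices are in range and the cell is valid)
def preberiA (plosca : List (List String)) (x y : Int) : String × Int :=
  let s := (PySem.List.pyGet? ((PySem.List.pyGet? plosca y).getD []) x).getD ""
  (PySem.Str.slice s none (some 1), (PySem.Int.ofStr? (PySem.Str.slice s (some 1) none)).getD 0)

def northA (x y vrednost : Int) : Int × Int := (x, y - vrednost)
def southA (x y vrednost : Int) : Int × Int := (x, y + vrednost)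
def eastA (x y vrednost : Int) : Int × Int := (x + vrednost, y)
def westA (x y vrednost : Int) : Int × Int := (x - vrednost, y)

-- options[smer]: dict lookup; the getD default stands for the KeyError, excluded by Pre_
def premakniA (plosca : List (List String)) (x y : Int) : Int × Int :=
  let r := preberiA plosca x y
  let options : PySem.Dict String (Int → Int → Int → Int × Int) :=
    PySem.Dict.ofList [("S", northA), ("J", southA), ("V", eastA), ("Z", westA)]
  ((PySem.Dict.get? options r.1).getD (fun a b _ => (a, b))) x y r.2

-- the while loop; fuel: each iteration grows prepotovano by one and the loop returns True as
-- soon as its length reaches polj, so polj + 1 fuel is never exhausted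
def ciklicnoLoop (plosca : List (List String)) (x y : Int)
    (prepotovano : List (Int × Int)) : Nat → Bool
  | 0 => false
  | fuel + 1 =>
    if naPlosciA plosca x y then
      let q := premakniA plosca x y
      let prep' := prepotovano ++ [(q.1, q.2)]
      if (prep'.length : Int) ≥ poljA plosca then true
      else ciklicnoLoop plosca q.1 q.2 prep' fuel
    else false

def ciklicno (plosca : List (List String)) (x : Int) (y : Int) : Bool :=
  ciklicnoLoop plosca x y [] (plosca.length * (plosca.headD []).length + 1)

-- ===== PORT B =====
-- the while loop of Source B; fuel: each iteration either stops or adds a fresh on-board cell to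
-- visited, so (number of cells) + 1 fuel is never exhausted on inputs satisfying Pre_
def ciklicnoAltLoop (plosca : List (List String)) (x y : Int)
    (visited : PySem.Set (Int × Int)) : Nat → Bool
  | 0 => false
  | fuel + 1 =>
    if decide (0 ≤ x ∧ x < ((plosca.headD []).length : Int)) &&
       decide (0 ≤ y ∧ y < (plosca.length : Int)) then
      if PySem.Set.contains visited (x, y) then true
      else
        -- cell = plosca[y][x]; smer, vrednost = cell[0], int(cell[1:])
        let cell := (PySem.List.pyGet? ((PySem.List.pyGet? plosca y).getD []) x).getD ""
        let smer := PySem.Str.pyGet? cell 0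
        let vrednost := (PySem.Int.ofStr? (PySem.Str.slice cell (some 1) none)).getD 0
        let q : Int × Int :=
          if smer = some 'S' then (x, y - vrednost)
          else if smer = some 'J' then (x, y + vrednost)
          else if smer = some 'V' then (x + vrednost, y)
          else (x - vrednost, y)
        ciklicnoAltLoop plosca q.1 q.2 (PySem.Set.add visited (x, y)) fuel
    else false

def ciklicno_alt (plosca : List (List String)) (x : Int) (y : Int) : Bool :=
  ciklicnoAltLoop plosca x y PySem.Set.empty (plosca.length * (plosca.headD []).length + 1)

-- ===== PRECONDITION & SPEC =====
-- the three notions D_ needs, read off A's own helpers: the loop guard, the walk's step, polj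
def pvOnB (p : List (List String)) (q : Int × Int) : Bool := naPlosciA p q.1 q.2
def pvStep (p : List (List String)) (q : Int × Int) : Int × Int := premakniA p q.1 q.2
def pvN (p : List (List String)) : Nat := (poljA p).toNat

-- a cell string A can act on: a direction letter followed by a Python int literal
def pvValidCell (s : String) : Prop :=
  s.toList.headD ' ' ∈ (['S', 'J', 'V', 'Z'] : List Char) ∧
  s.toList ≠ [] ∧ (PySem.Int.ofChars? (s.toList.drop 1)).isSome = true

-- Pre_ excludes the empty board (A raises IndexError) and, when the start is on the board,
-- ragged rows and malformed cells (on the walk A raises Index/Key/ValueError); this also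
-- excludes some inputs on which A returns — walks that escape before touching a malformed
-- cell — because which cells are read depends on the walk itself.
def Pre_ciklicno (plosca : List (List String)) (x : Int) (y : Int) : Prop :=
  plosca ≠ [] ∧
  (pvOnB plosca (x, y) = true →
    (∀ r ∈ plosca, r.length = (plosca.headD []).length) ∧
    (∀ r ∈ plosca, ∀ s ∈ r, pvValidCell s))

instance (plosca : List (List String)) (x : Int) (y : Int) : Decidable (Pre_ciklicno plosca x y) := by
  unfold Pre_ciklicno pvValidCell; infer_instance

def pvWitness_ciklicno : List (List String) × Int × Int := ([["V1", "Z1"]], 0, 0)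

-- On boards where the walk visits polj pairwise-distinct on-board cells and then steps off the
-- board, A returns True (its move counter reaches polj) although the walk escapes; B returns
-- False, the intended answer since such a walk is not cyclic.
def D_ciklicno (plosca : List (List String)) (x : Int) (y : Int) : Prop :=
  0 < pvN plosca ∧
  ∀ i ≤ pvN plosca, pvOnB plosca ((pvStep plosca)^[i] (x, y)) = decide (i < pvN plosca)

instance (plosca : List (List String)) (x : Int) (y : Int) : Decidable (D_ciklicno plosca x y) := by
  unfold D_ciklicno; infer_instance

def Spec_ciklicno (plosca : List (List String)) (x : Int) (y : Int) (out : Bool) : Prop :=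
  ¬ D_ciklicno plosca x y → out = ciklicno_alt plosca x y

instance (plosca : List (List String)) (x : Int) (y : Int) (out : Bool) : Decidable (Spec_ciklicno plosca x y out) := by
  unfold Spec_ciklicno; infer_instance

def pvDiffWitness_ciklicno : List (List String) × Int × Int := ([["V1"]], 0, 0)
def pvDiffWitnessOut_ciklicno : Bool × Bool := (true, false)

-- ===== CLAIM (what is proved, stated in full; the proofs are below) =====
def Claim_unchanged_ciklicno : Prop := ∀ (plosca : List (List String)) (x : Int) (y : Int), Dom_ciklicno plosca x y → Pre_ciklicno plosca x y → Spec_ciklicno plosca x y (ciklicno plosca x y)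
def Claim_changed_ciklicno : Prop := Dom_ciklicno (pvDiffWitness_ciklicno.1) (pvDiffWitness_ciklicno.2.1) (pvDiffWitness_ciklicno.2.2) ∧ Pre_ciklicno (pvDiffWitness_ciklicno.1) (pvDiffWitness_ciklicno.2.1) (pvDiffWitness_ciklicno.2.2) ∧ D_ciklicno (pvDiffWitness_ciklicno.1) (pvDiffWitness_ciklicno.2.1) (pvDiffWitness_ciklicno.2.2) ∧ ciklicno (pvDiffWitness_ciklicno.1) (pvDiffWitness_ciklicno.2.1) (pvDiffWitness_ciklicno.2.2) = pvDiffWitnessOut_ciklicno.1 ∧ ciklicno_alt (pvDiffWitness_ciklicno.1) (pvDiffWitness_ciklicno.2.1) (pvDiffWitness_ciklicno.2.2) = pvDiffWitnessOut_ciklicno.2 ∧ pvDiffWitnessOut_ciklicno.1 ≠ pvDiffWitnessOut_ciklicno.2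
def Claim_exact_ciklicno : Prop := ∀ (plosca : List (List String)) (x : Int) (y : Int), Dom_ciklicno plosca x y → Pre_ciklicno plosca x y → D_ciklicno plosca x y → ciklicno plosca x y ≠ ciklicno_alt plosca x y

-- ===== LEMMAS AND PROOFS =====

-- proof-side names for the trajectory, the cell read by pvStep and its parsed value
def pvIt (plosca : List (List String)) (q : Int × Int) (n : Nat) : Int × Int :=
  (pvStep plosca)^[n] q

def pvCell (plosca : List (List String)) (q : Int × Int) : String :=
  (plosca.getD q.2.toNat []).getD q.1.toNat ""

def pvVal (s : String) : Int := (PySem.Int.ofChars? s.toList.tail).getD 0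

-- canonical form of one step of the walk, for the proofs
def pvStepC (p : List (List String)) (q : Int × Int) : Int × Int :=
  let s := ((p.getD q.2.toNat []).getD q.1.toNat "").toList
  let v := (PySem.Int.ofChars? s.tail).getD 0
  if s.headD 'Z' = 'S' then (q.1, q.2 - v)
  else if s.headD 'Z' = 'J' then (q.1, q.2 + v)
  else if s.headD 'Z' = 'V' then (q.1 + v, q.2)
  else (q.1 - v, q.2)

theorem pvStepC_eq_cell (p : List (List String)) (q : Int × Int) :
    pvStepC p q =
      (let s := pvCell p q
       let v := pvVal s
       if s.toList.headD 'Z' = 'S' then (q.1, q.2 - v)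
       else if s.toList.headD 'Z' = 'J' then (q.1, q.2 + v)
       else if s.toList.headD 'Z' = 'V' then (q.1 + v, q.2)
       else (q.1 - v, q.2)) := rfl

-- board context once the start is on the board: rectangular, all cells valid
def pvCtx (plosca : List (List String)) : Prop :=
  (∀ r ∈ plosca, r.length = (plosca.headD []).length) ∧
  (∀ r ∈ plosca, ∀ s ∈ r, pvValidCell s)

theorem valid_destruct (s : String) (hv : pvValidCell s) :
    ∃ c t, s.toList = c :: t ∧ (c = 'S' ∨ c = 'J' ∨ c = 'V' ∨ c = 'Z') ∧
      (PySem.Int.ofChars? t).isSome = true := by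
  obtain ⟨hmem, hne, hsome⟩ := hv
  cases hs : s.toList with
  | nil => exact absurd hs hne
  | cons c t =>
    rw [hs] at hmem hsome
    simp at hmem
    exact ⟨c, t, rfl, hmem, by simpa using hsome⟩

theorem toList_slice_head (s : String) :
    (PySem.Str.slice s none (some 1)).toList = s.toList.take 1 := by
  simp [PySem.Str.slice]
  simpa using PySem.List.slice_to_natCast s.toList 1

theorem toList_slice_tail (s : String) :
    (PySem.Str.slice s (some 1) none).toList = s.toList.drop 1 := by
  simp [PySem.Str.slice]
  simpa using PySem.List.slice_from_natCast s.toList 1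

theorem sliceA_head (s : String) (c : Char) (t : List Char) (h : s.toList = c :: t) :
    PySem.Str.slice s none (some 1) = c.toString := by
  apply String.toList_inj.mp
  rw [toList_slice_head, h]
  simp

theorem sliceA_tail (s : String) (c : Char) (t : List Char) (h : s.toList = c :: t) :
    PySem.Int.ofStr? (PySem.Str.slice s (some 1) none) = PySem.Int.ofChars? t := by
  have h1 : PySem.Int.ofStr? (PySem.Str.slice s (some 1) none) =
      PySem.Int.ofChars? (PySem.Str.slice s (some 1) none).toList := by
    simp [PySem.Int.ofStr?]
  rw [h1, toList_slice_tail, h]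
  rfl

theorem onB_iff (p : List (List String)) (q : Int × Int) :
    pvOnB p q = true ↔
      0 ≤ q.1 ∧ q.1 < ((p.headD []).length : Int) ∧ 0 ≤ q.2 ∧ q.2 < (p.length : Int) := by
  simp only [pvOnB, naPlosciA, visinaA, sirinaA, Bool.and_eq_true, decide_eq_true_eq]
  omega

theorem guardA_eq (p : List (List String)) (x y : Int) :
    naPlosciA p x y = pvOnB p (x, y) := rfl

theorem guardB_eq (p : List (List String)) (x y : Int) :
    (decide (0 ≤ x ∧ x < ((p.headD []).length : Int)) &&
     decide (0 ≤ y ∧ y < (p.length : Int))) = pvOnB p (x, y) := by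
  apply Bool.eq_iff_iff.mpr
  rw [onB_iff]
  simp only [Bool.and_eq_true, decide_eq_true_eq]
  omega

theorem pvN_eq (p : List (List String)) : pvN p = p.length * (p.headD []).length := by
  simp only [pvN, poljA, visinaA, sirinaA]
  rw [← Nat.cast_mul, Int.toNat_natCast]

theorem poljA_eq (p : List (List String)) : poljA p = (pvN p : Int) := by
  rw [pvN_eq]
  simp only [poljA, visinaA, sirinaA]
  push_cast
  ring

theorem pvN_pos_of_onB (p : List (List String)) (q : Int × Int) (hq : pvOnB p q = true) :
    0 < pvN p := by
  obtain ⟨h1, h2, h3, h4⟩ := (onB_iff p q).mp hq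
  rw [pvN_eq]
  have h5 : 0 < p.length := by omega
  have h6 : 0 < (p.headD []).length := by omega
  exact Nat.mul_pos h5 h6

theorem cellA_eq (p : List (List String)) (x y : Int) (hOn : pvOnB p (x, y) = true) :
    (PySem.List.pyGet? ((PySem.List.pyGet? p y).getD []) x).getD "" = pvCell p (x, y) := by
  obtain ⟨hx0, hxW, hy0, hyH⟩ := (onB_iff p (x, y)).mp hOn
  rw [PySem.List.pyGet?_of_nonneg _ hy0, PySem.List.pyGet?_of_nonneg _ hx0]
  simp [pvCell, List.getD_eq_getElem?_getD]

theorem cell_valid (p : List (List String)) (q : Int × Int) (hC : pvCtx p)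
    (hOn : pvOnB p q = true) : pvValidCell (pvCell p q) := by
  obtain ⟨hrect, hval⟩ := hC
  obtain ⟨hx0, hxW, hy0, hyH⟩ := (onB_iff p q).mp hOn
  have hyN : q.2.toNat < p.length := by omega
  have hxN : q.1.toNat < (p.headD []).length := by omega
  have hrmem : p[q.2.toNat] ∈ p := List.getElem_mem _
  have hx' : q.1.toNat < (p[q.2.toNat]).length := by rw [hrect _ hrmem]; exact hxN
  have hpc : pvCell p q = (p[q.2.toNat])[q.1.toNat] := by
    simp [pvCell, List.getD_eq_getElem?_getD, hyN, hx']
  rw [hpc]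
  exact hval _ hrmem _ (List.getElem_mem _)

theorem dictS : PySem.Dict.get? (PySem.Dict.ofList
    [("S", northA), ("J", southA), ("V", eastA), ("Z", westA)]) "S" = some northA := rfl
theorem dictJ : PySem.Dict.get? (PySem.Dict.ofList
    [("S", northA), ("J", southA), ("V", eastA), ("Z", westA)]) "J" = some southA := rfl
theorem dictV : PySem.Dict.get? (PySem.Dict.ofList
    [("S", northA), ("J", southA), ("V", eastA), ("Z", westA)]) "V" = some eastA := rfl
theorem dictZ : PySem.Dict.get? (PySem.Dict.ofList
    [("S", northA), ("J", southA), ("V", eastA), ("Z", westA)]) "Z" = some westA := rfl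

theorem stepA_eq (p : List (List String)) (x y : Int) (hOn : pvOnB p (x, y) = true)
    (hv : pvValidCell (pvCell p (x, y))) :
    premakniA p x y = pvStepC p (x, y) := by
  obtain ⟨c, t, hts, hd, _⟩ := valid_destruct _ hv
  have hcell := cellA_eq p x y hOn
  have hs : preberiA p x y = (PySem.Str.slice (pvCell p (x, y)) none (some 1),
      (PySem.Int.ofStr? (PySem.Str.slice (pvCell p (x, y)) (some 1) none)).getD 0) := by
    simp only [preberiA, hcell]
  have htail := sliceA_tail (pvCell p (x, y)) c t hts
  have hhead := sliceA_head (pvCell p (x, y)) c t hts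
  rcases hd with h | h | h | h <;> subst h
  · have hh : PySem.Str.slice (pvCell p (x, y)) none (some 1) = "S" := by rw [hhead]; rfl
    rw [pvStepC_eq_cell]
    simp [premakniA, hs, hh, htail, dictS, northA, pvVal, hts]
    try omega
  · have hh : PySem.Str.slice (pvCell p (x, y)) none (some 1) = "J" := by rw [hhead]; rfl
    rw [pvStepC_eq_cell]
    simp [premakniA, hs, hh, htail, dictJ, southA, pvVal, hts]
    try omega
  · have hh : PySem.Str.slice (pvCell p (x, y)) none (some 1) = "V" := by rw [hhead]; rfl
    rw [pvStepC_eq_cell]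
    simp [premakniA, hs, hh, htail, dictV, eastA, pvVal, hts]
    try omega
  · have hh : PySem.Str.slice (pvCell p (x, y)) none (some 1) = "Z" := by rw [hhead]; rfl
    rw [pvStepC_eq_cell]
    simp [premakniA, hs, hh, htail, dictZ, westA, pvVal, hts]
    try omega

theorem pvStep_canon (p : List (List String)) (q : Int × Int) (hOn : pvOnB p q = true)
    (hv : pvValidCell (pvCell p q)) : pvStep p q = pvStepC p q := by
  show premakniA p q.1 q.2 = pvStepC p q
  rw [stepA_eq p q.1 q.2 (by rw [Prod.mk.eta]; exact hOn) (by rw [Prod.mk.eta]; exact hv),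
    Prod.mk.eta]

theorem pvIt_zero (p : List (List String)) (q : Int × Int) : pvIt p q 0 = q := rfl

theorem pvIt_succ (p : List (List String)) (q : Int × Int) (n : Nat) :
    pvIt p q (n + 1) = pvIt p (pvStep p q) n := by
  simp [pvIt, Function.iterate_succ_apply]

theorem pvIt_succ' (p : List (List String)) (q : Int × Int) (n : Nat) :
    pvIt p q (n + 1) = pvStep p (pvIt p q n) := by
  simp [pvIt, Function.iterate_succ_apply']

theorem pvIt_shift (p : List (List String)) (q : Int × Int) (a c : Nat) :
    pvIt p q (c + a) = (pvStep p)^[c] (pvIt p q a) := by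
  simp [pvIt, Function.iterate_add_apply]

-- D_ read through the proof-side names
theorem D_iff (p : List (List String)) (x y : Int) :
    D_ciklicno p x y ↔
      0 < pvN p ∧ (∀ i < pvN p, pvOnB p (pvIt p (x, y) i) = true) ∧
      pvOnB p (pvIt p (x, y) (pvN p)) = false := by
  unfold D_ciklicno pvIt
  constructor
  · rintro ⟨hN, h⟩
    refine ⟨hN, fun i hi => ?_, ?_⟩
    · simpa [hi] using h i (Nat.le_of_lt hi)
    · simpa using h (pvN p) le_rfl
  · rintro ⟨hN, hOn, hOff⟩
    refine ⟨hN, fun i hi => ?_⟩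
    rcases Nat.lt_or_ge i (pvN p) with h | h
    · simpa [h] using hOn i h
    · have hi' : i = pvN p := by omega
      subst hi'
      simpa using hOff

-- ===== A's loop: True iff all of the first (polj - count) positions are on the board =====
theorem loopA_char (p : List (List String)) (_hC : pvCtx p) :
    ∀ (fuel : Nat) (q : Int × Int) (prep : List (Int × Int)),
      prep.length < pvN p → pvN p - prep.length ≤ fuel →
      ciklicnoLoop p q.1 q.2 prep fuel =
        decide (∀ i < pvN p - prep.length, pvOnB p (pvIt p q i) = true) := by
  intro fuel
  induction fuel with
  | zero => intro q prep h1 h2; omega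
  | succ fuel ih =>
    intro q prep h1 h2
    simp only [ciklicnoLoop]
    rw [guardA_eq, Prod.mk.eta]
    by_cases hOn : pvOnB p q = true
    · have hstep : premakniA p q.1 q.2 = pvStep p q := rfl
      rw [hOn]
      simp only [if_true, hstep, Prod.mk.eta]
      have hlen : (prep ++ [pvStep p q]).length = prep.length + 1 := by simp
      by_cases hlast : ((prep ++ [pvStep p q]).length : Int) ≥ poljA p
      · rw [if_pos hlast]
        have hone : pvN p - prep.length = 1 := by
          rw [poljA_eq, hlen] at hlast
          have : pvN p ≤ prep.length + 1 := by exact_mod_cast hlast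
          omega
        rw [hone]
        symm; rw [decide_eq_true_iff]
        intro i hi
        interval_cases i
        simpa [pvIt_zero] using hOn
      · rw [if_neg hlast]
        have hlt : prep.length + 1 < pvN p := by
          rw [poljA_eq, hlen] at hlast
          have : ¬ ((pvN p : Int) ≤ (prep.length : Int) + 1) := by push_cast at hlast ⊢; omega
          omega
        have hfuel : pvN p - (prep ++ [pvStep p q]).length ≤ fuel := by
          rw [hlen]; omega
        rw [ih (pvStep p q) (prep ++ [pvStep p q]) (by rw [hlen]; omega) hfuel]
        apply decide_eq_decide.mpr
        rw [hlen]
        constructor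
        · intro h i hi
          cases i with
          | zero => simpa [pvIt_zero] using hOn
          | succ j =>
            rw [pvIt_succ]
            exact h j (by omega)
        · intro h i hi
          have := h (i + 1) (by omega)
          rwa [pvIt_succ] at this
    · rw [Bool.not_eq_true] at hOn
      rw [hOn]
      simp only [Bool.false_eq_true, if_false]
      symm; rw [decide_eq_false_iff_not]
      intro h
      have := h 0 (by omega)
      rw [pvIt_zero, hOn] at this
      exact Bool.false_ne_true this

theorem A_char (p : List (List String)) (x y : Int) (hC : pvCtx p) :
    ciklicno p x y =
      decide (0 < pvN p ∧ ∀ i < pvN p, pvOnB p (pvIt p (x, y) i) = true) := by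
  have hfuel : p.length * (p.headD []).length + 1 = pvN p + 1 := by rw [pvN_eq]
  by_cases hN : 0 < pvN p
  · have h := loopA_char p hC (pvN p + 1) (x, y) [] (by simpa using hN) (by simp)
    show ciklicnoLoop p x y [] (p.length * (p.headD []).length + 1) = _
    rw [hfuel, h]
    apply decide_eq_decide.mpr
    simp [hN]
  · have h0 : p.length = 0 ∨ (p.headD []).length = 0 := by
      have h1 : pvN p = 0 := by omega
      rw [pvN_eq] at h1
      exact Nat.mul_eq_zero.mp h1
    have hOff : pvOnB p (x, y) = false := by
      rw [Bool.eq_false_iff]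
      intro hOn
      obtain ⟨hx0, hxW, hy0, hyH⟩ := (onB_iff p (x, y)).mp hOn
      rcases h0 with h | h <;> omega
    show ciklicnoLoop p x y [] (p.length * (p.headD []).length + 1) = _
    rw [hfuel]
    simp only [ciklicnoLoop]
    rw [guardA_eq, hOff]
    simp [hN]

-- ===== B's loop: the visited set along the trajectory =====
def pvVis (p : List (List String)) (q₀ : Int × Int) (a : Nat) : PySem.Set (Int × Int) :=
  PySem.Set.ofList ((List.range a).map (pvIt p q₀))

theorem pvVis_succ (p : List (List String)) (q₀ : Int × Int) (a : Nat) :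
    pvVis p q₀ (a + 1) = PySem.Set.add (pvVis p q₀ a) (pvIt p q₀ a) := by
  unfold pvVis
  rw [List.range_succ, List.map_append, PySem.Set.ofList_eq_foldl, PySem.Set.ofList_eq_foldl,
    List.foldl_append]
  rfl

theorem mem_pvVis (p : List (List String)) (q₀ : Int × Int) (a : Nat) (v : Int × Int) :
    v ∈ pvVis p q₀ a ↔ ∃ k < a, pvIt p q₀ k = v := by
  unfold pvVis
  rw [PySem.Set.mem_ofList]
  simp

-- proof-side name for the step expression inside B's loop body
def bstep (p : List (List String)) (x y : Int) : Int × Int :=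
  let cell := (PySem.List.pyGet? ((PySem.List.pyGet? p y).getD []) x).getD ""
  let smer := PySem.Str.pyGet? cell 0
  let vrednost := (PySem.Int.ofStr? (PySem.Str.slice cell (some 1) none)).getD 0
  if smer = some 'S' then (x, y - vrednost)
  else if smer = some 'J' then (x, y + vrednost)
  else if smer = some 'V' then (x + vrednost, y)
  else (x - vrednost, y)

theorem altLoop_succ (p : List (List String)) (x y : Int) (vis : PySem.Set (Int × Int)) (fuel : Nat) :
    ciklicnoAltLoop p x y vis (fuel + 1) =
      if pvOnB p (x, y) then
        (if PySem.Set.contains vis (x, y) then true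
         else ciklicnoAltLoop p (bstep p x y).1 (bstep p x y).2
                (PySem.Set.add vis (x, y)) fuel)
      else false := by
  simp only [ciklicnoAltLoop]
  rw [guardB_eq]
  rfl

theorem stepB_eq (p : List (List String)) (x y : Int) (hOn : pvOnB p (x, y) = true)
    (hv : pvValidCell (pvCell p (x, y))) :
    bstep p x y = pvStep p (x, y) := by
  rw [pvStep_canon p (x, y) hOn hv, pvStepC_eq_cell]
  obtain ⟨c, t, hts, hd, _⟩ := valid_destruct _ hv
  have hcell := cellA_eq p x y hOn
  have htail := sliceA_tail (pvCell p (x, y)) c t hts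
  rcases hd with h | h | h | h <;> subst h <;>
    simp [bstep, hcell, htail, pvVal, hts]

theorem loopB_false (p : List (List String)) (hC : pvCtx p) (q₀ : Int × Int) (m : Nat)
    (hOn : ∀ k < m, pvOnB p (pvIt p q₀ k) = true)
    (hOff : pvOnB p (pvIt p q₀ m) = false)
    (hDis : ∀ i < m, ∀ j < m, i ≠ j → pvIt p q₀ i ≠ pvIt p q₀ j) :
    ∀ (fuel a : Nat), a ≤ m → m - a < fuel →
      ciklicnoAltLoop p (pvIt p q₀ a).1 (pvIt p q₀ a).2 (pvVis p q₀ a) fuel = false := by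
  intro fuel
  induction fuel with
  | zero => intro a h1 h2; omega
  | succ fuel ih =>
    intro a h1 h2
    rw [altLoop_succ, Prod.mk.eta]
    by_cases ha : a = m
    · subst ha
      rw [hOff]
      simp
    · have haOn := hOn a (by omega)
      rw [haOn]
      simp only [if_true]
      have hnc : PySem.Set.contains (pvVis p q₀ a) (pvIt p q₀ a) = false := by
        rw [Bool.eq_false_iff]
        intro hc
        obtain ⟨k, hk, hke⟩ := (mem_pvVis p q₀ a _).mp ((PySem.Set.contains_iff _ _).mp hc)
        exact hDis k (by omega) a (by omega) (by omega) hke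
      rw [hnc]
      simp only [Bool.false_eq_true, if_false]
      rw [stepB_eq p _ _ (by rw [Prod.mk.eta]; exact haOn)
        (by rw [Prod.mk.eta]; exact cell_valid p _ hC haOn), Prod.mk.eta]
      rw [← pvIt_succ', ← pvVis_succ]
      exact ih (a + 1) (by omega) (by omega)

theorem loopB_true (p : List (List String)) (hC : pvCtx p) (q₀ : Int × Int) (i j : Nat)
    (hij : i < j) (heq : pvIt p q₀ i = pvIt p q₀ j)
    (hOn : ∀ k ≤ j, pvOnB p (pvIt p q₀ k) = true)
    (hDis : ∀ a < j, ∀ b < j, a ≠ b → pvIt p q₀ a ≠ pvIt p q₀ b) :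
    ∀ (fuel a : Nat), a ≤ j → j - a < fuel →
      ciklicnoAltLoop p (pvIt p q₀ a).1 (pvIt p q₀ a).2 (pvVis p q₀ a) fuel = true := by
  intro fuel
  induction fuel with
  | zero => intro a h1 h2; omega
  | succ fuel ih =>
    intro a h1 h2
    rw [altLoop_succ, Prod.mk.eta]
    rw [hOn a h1]
    simp only [if_true]
    by_cases ha : a = j
    · subst ha
      have hc : PySem.Set.contains (pvVis p q₀ a) (pvIt p q₀ a) = true := by
        rw [PySem.Set.contains_iff, mem_pvVis]
        exact ⟨i, hij, heq⟩
      rw [hc]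
      simp
    · have hnc : PySem.Set.contains (pvVis p q₀ a) (pvIt p q₀ a) = false := by
        rw [Bool.eq_false_iff]
        intro hc
        obtain ⟨k, hk, hke⟩ := (mem_pvVis p q₀ a _).mp ((PySem.Set.contains_iff _ _).mp hc)
        exact hDis k (by omega) a (by omega) (by omega) hke
      rw [hnc]
      simp only [Bool.false_eq_true, if_false]
      have haOn := hOn a (by omega)
      rw [stepB_eq p _ _ (by rw [Prod.mk.eta]; exact haOn)
        (by rw [Prod.mk.eta]; exact cell_valid p _ hC haOn), Prod.mk.eta]
      rw [← pvIt_succ', ← pvVis_succ]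
      exact ih (a + 1) (by omega) (by omega)

-- ===== counting: the board as a finite set of cells =====
theorem mem_cells_of_onB (p : List (List String)) (q : Int × Int) (hq : pvOnB p q = true) :
    q ∈ (Finset.Ico (0 : Int) ((p.headD []).length : Int)) ×ˢ
        (Finset.Ico (0 : Int) (p.length : Int)) := by
  obtain ⟨h1, h2, h3, h4⟩ := (onB_iff p q).mp hq
  simp only [Finset.mem_product, Finset.mem_Ico]
  exact ⟨⟨h1, h2⟩, h3, h4⟩

theorem cells_card (p : List (List String)) :
    ((Finset.Ico (0 : Int) ((p.headD []).length : Int)) ×ˢ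
     (Finset.Ico (0 : Int) (p.length : Int))).card = pvN p := by
  rw [Finset.card_product, Int.card_Ico, Int.card_Ico, pvN_eq]
  simp
  ring

-- a repeat forces the whole trajectory into the points before the repeat
theorem repeat_confines (p : List (List String)) (q₀ : Int × Int) (i j : Nat)
    (hij : i < j) (heq : pvIt p q₀ i = pvIt p q₀ j) :
    ∀ m, ∃ k, k < j ∧ pvIt p q₀ m = pvIt p q₀ k := by
  intro m
  induction m using Nat.strong_induction_on with
  | _ m IH =>
    by_cases hm : m < j
    · exact ⟨m, hm, rfl⟩
    · have hkey : pvIt p q₀ m = pvIt p q₀ (m - j + i) := by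
        calc pvIt p q₀ m = (pvStep p)^[m - j] (pvIt p q₀ j) := by
              rw [← pvIt_shift]; congr 1; omega
        _ = (pvStep p)^[m - j] (pvIt p q₀ i) := by rw [heq]
        _ = pvIt p q₀ (m - j + i) := by rw [pvIt_shift]
      obtain ⟨k, hk, hke⟩ := IH (m - j + i) (by omega)
      exact ⟨k, hk, by rw [hkey, hke]⟩

-- if the trajectory never leaves the board it must repeat within polj steps
theorem no_escape_repeat (p : List (List String)) (q₀ : Int × Int)
    (hall : ∀ m, pvOnB p (pvIt p q₀ m) = true) :
    ∃ j ≤ pvN p, ∃ i < j, pvIt p q₀ i = pvIt p q₀ j := by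
  have hmaps : Set.MapsTo (pvIt p q₀) ↑(Finset.range (pvN p + 1))
      ↑((Finset.Ico (0 : Int) ((p.headD []).length : Int)) ×ˢ
        (Finset.Ico (0 : Int) (p.length : Int))) := by
    intro i _
    exact mem_cells_of_onB p _ (hall i)
  have hcard : ((Finset.Ico (0 : Int) ((p.headD []).length : Int)) ×ˢ
      (Finset.Ico (0 : Int) (p.length : Int))).card < (Finset.range (pvN p + 1)).card := by
    rw [cells_card, Finset.card_range]; omega
  obtain ⟨a, ha, b, hb, hne, heq⟩ :=
    Finset.exists_ne_map_eq_of_card_lt_of_maps_to hcard hmaps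
  rw [Finset.mem_range] at ha hb
  rcases Nat.lt_or_ge a b with h | h
  · exact ⟨b, by omega, a, h, heq⟩
  · exact ⟨a, by omega, b, by omega, heq.symm⟩

-- a trajectory with no repeat before its first escape fits on the board
theorem escape_le_polj (p : List (List String)) (q₀ : Int × Int) (m : Nat)
    (hOn : ∀ k < m, pvOnB p (pvIt p q₀ k) = true)
    (hDis : ∀ i < m, ∀ j < m, i ≠ j → pvIt p q₀ i ≠ pvIt p q₀ j) :
    m ≤ pvN p := by
  have hmaps : Set.MapsTo (pvIt p q₀) ↑(Finset.range m)
      ↑((Finset.Ico (0 : Int) ((p.headD []).length : Int)) ×ˢ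
        (Finset.Ico (0 : Int) (p.length : Int))) := by
    intro i hi
    rw [Finset.coe_range, Set.mem_Iio] at hi
    exact mem_cells_of_onB p _ (hOn i hi)
  have hinj : Set.InjOn (pvIt p q₀) ↑(Finset.range m) := by
    intro a ha b hb hab
    rw [Finset.coe_range, Set.mem_Iio] at ha hb
    by_contra hne
    exact hDis a ha b hb hne hab
  have := Finset.card_le_card_of_injOn _ hmaps hinj
  rwa [Finset.card_range, cells_card] at this

-- distinctness before the first escape
theorem dis_before_escape (p : List (List String)) (q₀ : Int × Int) (m : Nat)
    (hOn : ∀ k < m, pvOnB p (pvIt p q₀ k) = true)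
    (hOff : pvOnB p (pvIt p q₀ m) = false) :
    ∀ i < m, ∀ j < m, i ≠ j → pvIt p q₀ i ≠ pvIt p q₀ j := by
  intro i hi j hj hne heq
  have key : ∀ (a b : Nat), a < b → b < m → pvIt p q₀ a = pvIt p q₀ b → False := by
    intro a b hab hbm hE
    obtain ⟨k, hk, hke⟩ := repeat_confines p q₀ a b hab hE m
    have h1 := hOn k (by omega)
    rw [hke] at hOff
    rw [hOff] at h1
    exact Bool.false_ne_true h1
  rcases Nat.lt_or_ge i j with h | h
  · exact key i j h hj heq
  · exact key j i (by omega) hi heq.symm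

-- B unfolded at the start
theorem B_start (p : List (List String)) (x y : Int) :
    ciklicno_alt p x y =
      ciklicnoAltLoop p (pvIt p (x, y) 0).1 (pvIt p (x, y) 0).2 (pvVis p (x, y) 0) (pvN p + 1) := by
  show ciklicnoAltLoop p x y PySem.Set.empty (p.length * (p.headD []).length + 1) = _
  rw [pvN_eq]
  rfl

-- the two cornerstone results the claims are assembled from
theorem both_agree (p : List (List String)) (x y : Int) (hPre : Pre_ciklicno p x y)
    (hD : ¬ D_ciklicno p x y) : ciklicno p x y = ciklicno_alt p x y := by
  rw [D_iff] at hD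
  by_cases hOn : pvOnB p (x, y) = true
  · have hC : pvCtx p := hPre.2 hOn
    have hN : 0 < pvN p := pvN_pos_of_onB p _ hOn
    by_cases hesc : ∃ m, pvOnB p (pvIt p (x, y) m) = false
    · -- the walk escapes at its first off-board step m₀
      have hdec : ∀ m, Decidable (pvOnB p (pvIt p (x, y) m) = false) := fun m => inferInstance
      let m₀ := Nat.find hesc
      have hOff : pvOnB p (pvIt p (x, y) m₀) = false := Nat.find_spec hesc
      have hOn' : ∀ k < m₀, pvOnB p (pvIt p (x, y) k) = true := by
        intro k hk
        have := Nat.find_min hesc hk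
        rw [Bool.not_eq_false] at this
        exact this
      have hDis := dis_before_escape p (x, y) m₀ hOn' hOff
      have hm₀ : m₀ ≤ pvN p := escape_le_polj p (x, y) m₀ hOn' hDis
      have hB : ciklicno_alt p x y = false := by
        rw [B_start]
        exact loopB_false p hC (x, y) m₀ hOn' hOff hDis (pvN p + 1) 0 (by omega) (by omega)
      by_cases hfull : m₀ = pvN p
      · exfalso
        apply hD
        refine ⟨hN, ?_, ?_⟩
        · intro i hi; exact hOn' i (by omega)
        · rw [← hfull]; exact hOff
      · have hA : ciklicno p x y = false := by
          rw [A_char p x y hC]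
          rw [decide_eq_false_iff_not]
          intro h
          have := h.2 m₀ (by omega)
          rw [hOff] at this
          exact Bool.false_ne_true this
        rw [hA, hB]
    · -- the walk never leaves the board: it must repeat, both report a cycle
      have hall : ∀ m, pvOnB p (pvIt p (x, y) m) = true := by
        intro m
        by_contra h
        exact hesc ⟨m, by rw [Bool.not_eq_true] at h; exact h⟩
      have hA : ciklicno p x y = true := by
        rw [A_char p x y hC, decide_eq_true_iff]
        exact ⟨hN, fun i _ => hall i⟩
      obtain ⟨j, hjN, i, hij, heq⟩ := no_escape_repeat p (x, y) hall
      -- pass to the FIRST repeat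
      have hPex : ∃ b, ∃ a < b, pvIt p (x, y) a = pvIt p (x, y) b := ⟨j, i, hij, heq⟩
      let j₀ := Nat.find hPex
      obtain ⟨i₀, hi₀, heq₀⟩ : ∃ a < j₀, pvIt p (x, y) a = pvIt p (x, y) j₀ := Nat.find_spec hPex
      have hj₀ : j₀ ≤ pvN p := Nat.find_min' hPex ⟨i, hij, heq⟩ |>.trans hjN
      have hDis : ∀ a < j₀, ∀ b < j₀, a ≠ b → pvIt p (x, y) a ≠ pvIt p (x, y) b := by
        intro a ha b hb hne hE
        rcases Nat.lt_or_ge a b with h | h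
        · exact Nat.find_min hPex hb ⟨a, h, hE⟩
        · exact Nat.find_min hPex ha ⟨b, by omega, hE.symm⟩
      have hB : ciklicno_alt p x y = true := by
        rw [B_start]
        exact loopB_true p hC (x, y) i₀ j₀ hi₀ heq₀ (fun k _ => hall k) hDis (pvN p + 1) 0
          (by omega) (by omega)
      rw [hA, hB]
  · -- the start is off the board: both return False at once
    rw [Bool.not_eq_true] at hOn
    have hA : ciklicno p x y = false := by
      show ciklicnoLoop p x y [] (p.length * (p.headD []).length + 1) = false
      simp only [ciklicnoLoop]
      rw [guardA_eq, hOn]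
      simp
    have hB : ciklicno_alt p x y = false := by
      rw [B_start, altLoop_succ]
      simp only [Prod.mk.eta]
      rw [pvIt_zero, hOn]
      simp
    rw [hA, hB]

theorem both_differ (p : List (List String)) (x y : Int) (hPre : Pre_ciklicno p x y)
    (hD : D_ciklicno p x y) : ciklicno p x y = true ∧ ciklicno_alt p x y = false := by
  rw [D_iff] at hD
  obtain ⟨hN, hOnAll, hOff⟩ := hD
  have hDis := dis_before_escape p (x, y) (pvN p) hOnAll hOff
  have hOn : pvOnB p (x, y) = true := by
    have := hOnAll 0 (by omega)
    rwa [pvIt_zero] at this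
  have hC : pvCtx p := hPre.2 hOn
  constructor
  · rw [A_char p x y hC, decide_eq_true_iff]
    exact ⟨hN, hOnAll⟩
  · rw [B_start]
    exact loopB_false p hC (x, y) (pvN p) hOnAll hOff
      (fun i hi j hj hne => hDis i hi j hj hne) (pvN p + 1) 0 (by omega) (by omega)

-- ===== VERDICT (by name: the statement is the Claim_ definition above) =====
theorem ciklicno_spec : Claim_unchanged_ciklicno := by
  intro p x y _ hPre
  unfold Spec_ciklicno
  intro hD
  exact both_agree p x y hPre hD
theorem ciklicno_changed : Claim_changed_ciklicno := by unfold Claim_changed_ciklicno; decide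
theorem ciklicno_tight : Claim_exact_ciklicno := by
  intro p x y _ hPre hD
  obtain ⟨hA, hB⟩ := both_differ p x y hPre hD
  rw [hA, hB]
  simp
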